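-- pv_equiv track=rewrite | github.com/Jialin-Ye/Mapping-the-spontaneous-behavior-patterns-in-male-and-female-mice | Figure1_ExpeimentDesign&DataProcessing/Figure1B_skeleton_demo/Demo_figure1.py | return_AnnoMovement
-- ===== SOURCE A (Python) =====
-- def return_AnnoMovement(number):
--     movement_dict = {'running':[33,1,2],
--                  'trotting':[40,10,9],
--                  'walking':[8],
--                  'right_turning':[5,30],
--                  'left_turning':[6,34],
--                  'climb_up':[39,11,12],
--                  'falling':[27,14],
--                  'rising':[32,13],
--                  'grooming':[24,22,21],
--                  'down_search':[35,18,7,26,38],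
--                  'stepping':[25,19,3],
--                  'sniffing':[37,31,4,17],
--                  'rearing':[28,23,],
--                  'pause':[16,15,36,20,29]
--                  }
--     for key in movement_dict.keys():
--         if number in movement_dict[key]:
--             return(key)
-- ===== SOURCE B (Python) =====
-- # Dense lookup table: the original label->numbers dict covers exactly {1..40},
-- # so index number-1 into a flat array (entry i holds the label of number i+1).
-- _LABELS = ['running', 'running', 'stepping', 'sniffing', 'right_turning',
--            'left_turning', 'down_search', 'walking', 'trotting', 'trotting',
--            'climb_up', 'climb_up', 'rising', 'falling', 'pause',
--            'pause', 'sniffing', 'down_search', 'stepping', 'pause',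
--            'grooming', 'grooming', 'rearing', 'grooming', 'stepping',
--            'down_search', 'falling', 'rearing', 'pause', 'right_turning',
--            'sniffing', 'rising', 'running', 'left_turning', 'down_search',
--            'pause', 'sniffing', 'down_search', 'climb_up', 'trotting']
--
-- def return_AnnoMovement(number):
--     if 1 <= number <= 40:
--         return _LABELS[number - 1]
--     return None
-- ===== Notes on version B (the rewrite author's own statement) =====
-- stated objective: faster
-- what changed: Replaced the per-call scan over every label's number list with a dense precomputed array of 40 labels indexed directly by number-1 (numbers 1..40 cover the table exactly; out-of-range returns None like A's fall-through).
import Mathlib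
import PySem

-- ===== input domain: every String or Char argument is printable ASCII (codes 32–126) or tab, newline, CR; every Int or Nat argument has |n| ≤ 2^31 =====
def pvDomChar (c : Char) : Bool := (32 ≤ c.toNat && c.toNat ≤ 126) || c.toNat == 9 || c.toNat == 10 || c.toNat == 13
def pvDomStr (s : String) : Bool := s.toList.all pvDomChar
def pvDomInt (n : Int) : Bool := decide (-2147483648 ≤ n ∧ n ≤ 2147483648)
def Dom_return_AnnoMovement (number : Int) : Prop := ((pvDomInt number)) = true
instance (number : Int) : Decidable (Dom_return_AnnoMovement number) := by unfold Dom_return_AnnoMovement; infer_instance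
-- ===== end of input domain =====

-- B replaces A's per-call scan over every label's number list with a dense 40-entry
-- label array indexed by number-1 (the table's numbers cover exactly 1..40).

-- ===== PORT A =====
-- A's dict literal, as an insertion-ordered association list (all keys distinct).
def pvMovementDict : List (String × List Int) :=
  [("running", [33,1,2]),
   ("trotting", [40,10,9]),
   ("walking", [8]),
   ("right_turning", [5,30]),
   ("left_turning", [6,34]),
   ("climb_up", [39,11,12]),
   ("falling", [27,14]),
   ("rising", [32,13]),
   ("grooming", [24,22,21]),
   ("down_search", [35,18,7,26,38]),
   ("stepping", [25,19,3]),
   ("sniffing", [37,31,4,17]),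
   ("rearing", [28,23]),
   ("pause", [16,15,36,20,29])]

-- the 'for key in keys: if number in dict[key]: return key' loop (early return = first match, else None)
def pvScan (number : Int) : List (String × List Int) → Option String
  | [] => none
  | (k, v) :: rest => if number ∈ v then some k else pvScan number rest

def return_AnnoMovement (number : Int) : Option String :=
  pvScan number pvMovementDict

-- ===== PORT B =====
-- Source B's flat label table: entry i is the movement label of behaviour number i+1
def pvLabels : List String :=
  ["running", "running", "stepping", "sniffing", "right_turning",
   "left_turning", "down_search", "walking", "trotting", "trotting",
   "climb_up", "climb_up", "rising", "falling", "pause",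
   "pause", "sniffing", "down_search", "stepping", "pause",
   "grooming", "grooming", "rearing", "grooming", "stepping",
   "down_search", "falling", "rearing", "pause", "right_turning",
   "sniffing", "rising", "running", "left_turning", "down_search",
   "pause", "sniffing", "down_search", "climb_up", "trotting"]

def return_AnnoMovement_alt (number : Int) : Option String :=
  if 1 ≤ number ∧ number ≤ 40 then pvLabels[(number - 1).toNat]? else none

-- ===== PRECONDITION & SPEC =====
def Spec_return_AnnoMovement (number : Int) (out : Option String) : Prop := out = return_AnnoMovement_alt number
instance (number : Int) (out : Option String) : Decidable (Spec_return_AnnoMovement number out) := by unfold Spec_return_AnnoMovement; infer_instance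

-- ===== CLAIM (what is proved, stated in full; the proofs are below) =====
def Claim_equal_return_AnnoMovement : Prop := ∀ (number : Int), Dom_return_AnnoMovement number → Spec_return_AnnoMovement number (return_AnnoMovement number)

-- ===== LEMMAS AND PROOFS =====
-- A's loop returns None when no entry's list contains the number
theorem pvScan_none (n : Int) (d : List (String × List Int)) (h : ∀ p ∈ d, n ∉ p.2) :
    pvScan n d = none := by
  induction d with
  | nil => rfl
  | cons p rest ih =>
    obtain ⟨k, v⟩ := p
    simp only [pvScan, if_neg (h (k, v) (by simp))]
    exact ih (fun q hq => h q (by simp [hq]))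

-- all numbers occurring in the table, in scan order
def pvAllNums : List Int :=
  [33,1,2,40,10,9,8,5,30,6,34,39,11,12,27,14,32,13,24,22,21,35,18,7,26,38,25,19,3,37,31,4,17,28,23,16,15,36,20,29]

-- on every number of the table, the two ports agree (one kernel evaluation)
set_option maxRecDepth 100000 in
theorem pvTable_agree :
    pvAllNums.all (fun n => return_AnnoMovement n == return_AnnoMovement_alt n) = true := by
  decide

-- ===== VERDICT (by name: the statement is the Claim_ definition above) =====
set_option maxRecDepth 100000 in
set_option maxHeartbeats 2000000 in
theorem return_AnnoMovement_spec : Claim_equal_return_AnnoMovement := by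
  intro n _
  unfold Spec_return_AnnoMovement
  by_cases h : n ∈ pvAllNums
  · exact eq_of_beq (List.all_eq_true.mp pvTable_agree n h)
  · have hn : ¬ (1 ≤ n ∧ n ≤ 40) := by
      intro hr
      apply h
      simp only [pvAllNums, List.mem_cons, List.not_mem_nil, or_false]
      omega
    have ha : return_AnnoMovement n = none := by
      apply pvScan_none
      intro p hp hmem
      apply hn
      fin_cases hp <;>
        simp only [List.mem_cons, List.not_mem_nil, or_false] at hmem <;> omega
    have hb : return_AnnoMovement_alt n = none := by
      simp only [return_AnnoMovement_alt, if_neg hn]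
    rw [ha, hb]
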